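-- pv_equiv track=rewrite | github.com/PonedelnikX/- | 5lab.py | algorithmic_method_with_constraint
-- ===== SOURCE A (Python) =====
-- def algorithmic_method_with_constraint(players, team_size, professionals, min_pros=2):
--     result = []
--     team = []
--
--     def backtrack(start, pros_count):
--         remaining = team_size - len(team)
--         possible_pros_left = sum(1 for p in players[start:] if p in professionals)
--         # Отсечка: если даже взяв всех оставшихся профи, не достигнем min_pros
--         if pros_count + possible_pros_left < min_pros:
--             return
--
--         if len(team) == team_size:
--             if pros_count >= min_pros:
--                 result.append(team.copy())
--             return
--
--         for i in range(start, len(players)):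
--             player = players[i]
--             team.append(player)
--             backtrack(i + 1, pros_count + (1 if player in professionals else 0))
--             team.pop()
--
--     backtrack(0, 0)
--     return result
-- ===== SOURCE B (Python) =====
-- def algorithmic_method_with_constraint(players, team_size, professionals, min_pros=2):
--     pros = set(professionals)
--     n = len(players)
--     # suf[i] = number of professionals among players[i:], computed once for O(1) pruning
--     suf = [0] * (n + 1)
--     for i in range(n - 1, -1, -1):
--         suf[i] = suf[i + 1] + (1 if players[i] in pros else 0)
--
--     def gen(start, size, need):
--         # all combinations of exactly `size` of players[start:], in order,
--         # containing at least `need` professionals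
--         if suf[start] < need:
--             return []
--         if size == 0:
--             return [[]] if need <= 0 else []
--         out = []
--         for i in range(start, n):
--             inc = 1 if players[i] in pros else 0
--             for tail in gen(i + 1, size - 1, need - inc):
--                 out.append([players[i]] + tail)
--         return out
--
--     return gen(0, team_size, min_pros)
-- ===== Notes on version B (the rewrite author's own statement) =====
-- stated objective: alternative
-- what changed: Replaces the mutable shared team/result backtracker, whose pruning re-scans the whole tail of players against the professionals list at every node, with a pure recursive generator that uses a set of professionals and a suffix professional-count list precomputed once, so each node prunes and tests membership in O(1) and builds its combinations functionally; per-node work drops from O(n*|professionals|) to O(1), though total time is dominated by the exponential output.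
import Mathlib
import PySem

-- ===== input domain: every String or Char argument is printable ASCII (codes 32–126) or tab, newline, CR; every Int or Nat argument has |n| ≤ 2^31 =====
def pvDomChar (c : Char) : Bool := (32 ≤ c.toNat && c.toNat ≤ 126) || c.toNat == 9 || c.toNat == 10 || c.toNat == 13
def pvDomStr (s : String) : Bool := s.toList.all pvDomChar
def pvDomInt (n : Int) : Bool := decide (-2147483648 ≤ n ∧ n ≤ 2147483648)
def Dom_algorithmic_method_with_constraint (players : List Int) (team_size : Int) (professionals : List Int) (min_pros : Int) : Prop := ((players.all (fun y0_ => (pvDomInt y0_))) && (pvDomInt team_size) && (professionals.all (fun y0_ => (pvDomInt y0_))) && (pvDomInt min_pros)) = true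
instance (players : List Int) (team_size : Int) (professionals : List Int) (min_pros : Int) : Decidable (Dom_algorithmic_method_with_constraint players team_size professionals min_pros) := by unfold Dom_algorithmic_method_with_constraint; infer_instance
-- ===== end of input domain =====

-- B replaces A's mutable backtracker (which re-scans the tail of players against the
-- professionals list at every node to prune) by a pure recursive generator over a
-- precomputed suffix professional-count list with set membership (O(1) work per node).

-- ===== PORT A =====
-- A's recursion on the index `start` is transcribed as structural recursion on the
-- suffix players[start:]; `team`/`result` are the mutable state threaded through.
mutual
def pvBtA (professionals : List Int) (team_size min_pros : Int) :
    List Int → Int → List Int → List (List Int) → List (List Int)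
  | s, pros_count, team, result =>
    -- possible_pros_left = sum(1 for p in players[start:] if p in professionals)
    let possible : Int := (s.filter (fun p => decide (p ∈ professionals))).length
    if pros_count + possible < min_pros then result
    else if (team.length : Int) = team_size then
      (if min_pros ≤ pros_count then result ++ [team] else result)
    else pvLoopA professionals team_size min_pros s pros_count team result
  termination_by s _ _ _ => 2 * s.length + 1
  decreasing_by all_goals simp
def pvLoopA (professionals : List Int) (team_size min_pros : Int) :
    List Int → Int → List Int → List (List Int) → List (List Int)
  | [], _, _, result => result
  | p :: rest, pros_count, team, result =>
      pvLoopA professionals team_size min_pros rest pros_count team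
        (pvBtA professionals team_size min_pros rest
          (pros_count + (if decide (p ∈ professionals) then 1 else 0)) (team ++ [p]) result)
  termination_by s _ _ _ => 2 * s.length
  decreasing_by all_goals simp <;> omega
end

def algorithmic_method_with_constraint (players : List Int) (team_size : Int) (professionals : List Int) (min_pros : Int) : List (List Int) :=
  pvBtA professionals team_size min_pros players 0 [] []

-- ===== PORT B =====
-- suf (length n+1, suf[n] = 0), built back to front as in Source B's downward loop;
-- the generator walks players zipped with suf, so suf[start] is the head's tag.
def pvSuf (pros : PySem.Set Int) : List Int → List Int
  | [] => [0]
  | p :: rest =>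
      let acc := pvSuf pros rest
      ((if pros.contains p then 1 else 0) + acc.headD 0) :: acc

mutual
def pvGenB (pros : PySem.Set Int) : List (Int × Int) → Int → Int → List (List Int)
  | ann, size, need =>
    let sufStart : Int := match ann with | [] => 0 | (_, c) :: _ => c
    if sufStart < need then []
    else if size = 0 then (if need ≤ 0 then [[]] else [])
    else pvLoopB pros ann size need
  termination_by ann _ _ => 2 * ann.length + 1
  decreasing_by all_goals simp
def pvLoopB (pros : PySem.Set Int) : List (Int × Int) → Int → Int → List (List Int)
  | [], _, _ => []
  | (p, _) :: rest, size, need =>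
      ((pvGenB pros rest (size - 1) (need - (if pros.contains p then 1 else 0))).map
        (fun t => p :: t)) ++ pvLoopB pros rest size need
  termination_by ann _ _ => 2 * ann.length
  decreasing_by all_goals simp <;> omega
end

def algorithmic_method_with_constraint_alt (players : List Int) (team_size : Int) (professionals : List Int) (min_pros : Int) : List (List Int) :=
  let pros := PySem.Set.ofList professionals
  pvGenB pros (players.zip (pvSuf pros players)) team_size min_pros

-- ===== PRECONDITION & SPEC =====
def Spec_algorithmic_method_with_constraint (players : List Int) (team_size : Int) (professionals : List Int) (min_pros : Int) (out : List (List Int)) : Prop := out = algorithmic_method_with_constraint_alt players team_size professionals min_pros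
instance (players : List Int) (team_size : Int) (professionals : List Int) (min_pros : Int) (out : List (List Int)) : Decidable (Spec_algorithmic_method_with_constraint players team_size professionals min_pros out) := by unfold Spec_algorithmic_method_with_constraint; infer_instance

-- ===== CLAIM (what is proved, stated in full; the proofs are below) =====
def Claim_equal_algorithmic_method_with_constraint : Prop := ∀ (players : List Int) (team_size : Int) (professionals : List Int) (min_pros : Int), Dom_algorithmic_method_with_constraint players team_size professionals min_pros → Spec_algorithmic_method_with_constraint players team_size professionals min_pros (algorithmic_method_with_constraint players team_size professionals min_pros)

-- ===== LEMMAS AND PROOFS =====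

-- number of professionals in a suffix
def pvC (professionals s : List Int) : Int :=
  ((s.filter (fun p => decide (p ∈ professionals))).length : Int)

theorem pvContains (professionals : List Int) (p : Int) :
    (PySem.Set.ofList professionals).contains p = decide (p ∈ professionals) := by
  by_cases h : p ∈ professionals
  · simp [h, PySem.Set.mem_ofList]
  · simp [h, PySem.Set.mem_ofList]

theorem pvC_cons (professionals : List Int) (p : Int) (rest : List Int) :
    pvC professionals (p :: rest) =
      (if decide (p ∈ professionals) then 1 else 0) + pvC professionals rest := by
  by_cases h : p ∈ professionals
  · simp [pvC, h]; omega
  · simp [pvC, h]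

theorem pvSuf_headD (professionals : List Int) (s : List Int) :
    (pvSuf (PySem.Set.ofList professionals) s).head?.getD 0 = pvC professionals s := by
  induction s with
  | nil => simp [pvSuf, pvC]
  | cons p rest ih =>
      rw [pvSuf]
      cases h : pvSuf (PySem.Set.ofList professionals) rest <;>
        simp_all [pvC_cons, List.headD]

theorem pvZip_suf_cons (professionals : List Int) (p : Int) (rest : List Int) :
    (p :: rest).zip (pvSuf (PySem.Set.ofList professionals) (p :: rest)) =
      (p, pvC professionals (p :: rest)) ::
        rest.zip (pvSuf (PySem.Set.ofList professionals) rest) := by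
  simp [pvSuf, pvSuf_headD, pvC_cons]

theorem pv_main (professionals : List Int) (team_size min_pros : Int) (s : List Int) :
    (∀ pros_count team result,
      pvLoopA professionals team_size min_pros s pros_count team result =
        result ++ (pvLoopB (PySem.Set.ofList professionals)
            (s.zip (pvSuf (PySem.Set.ofList professionals) s))
            (team_size - team.length) (min_pros - pros_count)).map (fun t => team ++ t)) ∧
    (∀ pros_count team result,
      pvBtA professionals team_size min_pros s pros_count team result =
        result ++ (pvGenB (PySem.Set.ofList professionals)
            (s.zip (pvSuf (PySem.Set.ofList professionals) s))
            (team_size - team.length) (min_pros - pros_count)).map (fun t => team ++ t)) := by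
  induction s with
  | nil =>
      constructor
      · intro pros_count team result
        simp [pvLoopA, pvLoopB]
      · intro pros_count team result
        rw [pvBtA]
        simp only [pvGenB, List.zip_nil_left, pvLoopA, pvLoopB, List.filter_nil,
          List.length_nil, Int.natCast_zero, add_zero]
        split_ifs <;> simp_all <;> omega
  | cons p rest ih =>
      have hloop : ∀ pros_count team result,
          pvLoopA professionals team_size min_pros (p :: rest) pros_count team result =
            result ++ (pvLoopB (PySem.Set.ofList professionals)
                ((p :: rest).zip (pvSuf (PySem.Set.ofList professionals) (p :: rest)))
                (team_size - team.length) (min_pros - pros_count)).map (fun t => team ++ t) := by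
        intro pros_count team result
        rw [pvLoopA, ih.1, ih.2, pvZip_suf_cons, pvLoopB]
        have hlen : (((team ++ [p]).length : Int)) = (team.length : Int) + 1 := by simp
        rw [hlen]
        have hsz : team_size - ((team.length : Int) + 1) = team_size - team.length - 1 := by ring
        have hnd : min_pros - (pros_count + (if decide (p ∈ professionals) then 1 else 0)) =
            min_pros - pros_count - (if decide (p ∈ professionals) then 1 else 0) := by ring
        rw [hsz, hnd, pvContains]
        simp [List.map_map, Function.comp_def]
      refine ⟨hloop, ?_⟩
      intro pros_count team result
      rw [pvBtA, pvZip_suf_cons, pvGenB]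
      have hC : (((p :: rest).filter (fun q => decide (q ∈ professionals))).length : Int) =
          pvC professionals (p :: rest) := rfl
      rw [hC]
      by_cases hprune : pros_count + pvC professionals (p :: rest) < min_pros
      · have hB : pvC professionals (p :: rest) < min_pros - pros_count := by omega
        simp [hprune, hB]
      · have hB : ¬ (pvC professionals (p :: rest) < min_pros - pros_count) := by omega
        by_cases h2 : (team.length : Int) = team_size
        · have hB2 : team_size - (team.length : Int) = 0 := by omega
          by_cases h3 : min_pros ≤ pros_count
          · have hB3 : min_pros - pros_count ≤ 0 := by omega
            simp [hprune, hB, h2, h3, hB3]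
          · have hB3 : ¬ (min_pros - pros_count ≤ 0) := by omega
            simp [hprune, hB, h2, h3, hB3]
        · have hB2 : ¬ (team_size - (team.length : Int) = 0) := by omega
          simp only [if_neg hprune, if_neg h2, if_neg hB, if_neg hB2]
          rw [← pvZip_suf_cons]
          exact hloop pros_count team result

-- ===== VERDICT (by name: the statement is the Claim_ definition above) =====
theorem algorithmic_method_with_constraint_spec : Claim_equal_algorithmic_method_with_constraint := by
  intro players team_size professionals min_pros _
  unfold Spec_algorithmic_method_with_constraint algorithmic_method_with_constraint algorithmic_method_with_constraint_alt
  have h := (pv_main professionals team_size min_pros players).2 0 [] []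
  simpa using h
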